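-- pv_equiv track=rewrite | github.com/el-f/CS-Material-And-Snippets | Python Courses + Snippets/Snippets/max_path_sum_two_lists.py | mps_v3
-- ===== SOURCE A (Python) =====
-- def mps_v3(l1, l2):
--
--     # Get common numbers of the lists 'l1' & 'l2'
--     common = list(set(set(l1).intersection(l2)))
--     common.sort()
--
--     # When there is no common element, return sum of the bigger list
--     if (len(common) < 1):
--         return(max([sum(l1), sum(l2)]))
--
--     # Loop over each common element & slice the vectors at it
--     max_sum = 0
--     for curr_common in common:
--
--         # Add the maximum of the sums over l1 & l2 up to 'curr_common'
--         max_sum = max_sum + max([sum(l1[:l1.index(curr_common) + 1]),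
--                                  sum(l2[:l2.index(curr_common) + 1])])
--
--         # Remove all elements from l1 & l2 up to 'curr_common'
--         # (the max. sum was already added to 'max_sum')
--         del l1[:l1.index(curr_common) + 1]
--         del l2[:l2.index(curr_common) + 1]
--
--     # Last step, add maximum sum of the remaining l1 & l2
--     max_sum = max_sum + max([sum(l1), sum(l2)])
--
--     return(max_sum)
-- ===== SOURCE B (Python) =====
-- def mps_v3(l1, l2):
--     # Single forward merge pass over both lists: keep running segment sums,
--     # and at every common crossover point bank the larger segment sum.
--     i = j = 0
--     s1 = s2 = total = 0
--     while i < len(l1) and j < len(l2):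
--         a, b = l1[i], l2[j]
--         if a < b:
--             s1 += a
--             i += 1
--         elif b < a:
--             s2 += b
--             j += 1
--         else:
--             total += max(s1, s2) + a
--             s1 = s2 = 0
--             i += 1
--             j += 1
--     s1 += sum(l1[i:])
--     s2 += sum(l2[j:])
--     return total + max(s1, s2)
-- ===== Notes on version B (the rewrite author's own statement) =====
-- stated objective: faster
-- what changed: Replaced the per-common-element pass (build+sort the intersection, then for each common value rescan with list.index, slice-sum and delete) by a single forward two-pointer merge over both lists that keeps running segment sums and banks the larger sum at every crossover.
-- outside the precondition, e.g. on mps_v3([1, 4, -1, 4], [3, 1, 2, 1]): A returns 11, B returns 8; on mps_v3([2, 1], [1, 2]): A raises ValueError, B returns 4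
import Mathlib
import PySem

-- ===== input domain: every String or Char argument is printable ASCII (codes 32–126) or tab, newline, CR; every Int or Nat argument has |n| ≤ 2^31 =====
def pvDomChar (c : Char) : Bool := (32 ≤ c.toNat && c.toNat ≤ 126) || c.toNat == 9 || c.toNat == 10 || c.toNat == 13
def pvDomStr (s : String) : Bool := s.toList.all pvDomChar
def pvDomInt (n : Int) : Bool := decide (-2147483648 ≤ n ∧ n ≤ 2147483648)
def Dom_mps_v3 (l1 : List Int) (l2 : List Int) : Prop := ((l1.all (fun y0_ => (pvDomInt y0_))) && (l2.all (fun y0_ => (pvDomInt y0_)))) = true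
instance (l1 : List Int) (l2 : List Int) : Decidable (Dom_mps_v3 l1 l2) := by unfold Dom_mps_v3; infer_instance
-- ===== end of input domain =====

-- B replaces A's per-common-element rescan (sorted intersection + list.index + slice sums +
-- deletion) by one forward two-pointer merge with running segment sums (return value only:
-- A also empties its list arguments in place, B does not mutate them).


-- ===== PORT A =====
-- the for-loop over 'common' with the mutated l1, l2 and max_sum as state; the base case is
-- the post-loop 'max_sum + max([sum(l1), sum(l2)])'
def mps_v3Loop : List Int → List Int → List Int → Int → Int
  | [], l1, l2, max_sum => max_sum + max l1.sum l2.sum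
  | c :: rest, l1, l2, max_sum =>
      let i1 := (PySem.List.index? l1 c).getD 0 + 1
      let i2 := (PySem.List.index? l2 c).getD 0 + 1
      mps_v3Loop rest (l1.drop i1) (l2.drop i2)
        (max_sum + max (l1.take i1).sum (l2.take i2).sum)

def mps_v3 (l1 : List Int) (l2 : List Int) : Int :=
  let common := PySem.List.sorted (PySem.Set.ofList (PySem.Set.inter (PySem.Set.ofList l1) l2)) (fun x => x) false
  if common.length < 1 then max l1.sum l2.sum
  else mps_v3Loop common l1 l2 0

-- ===== PORT B =====
-- the while-loop of Source B: two pointers (here the remaining suffixes), running segment sums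
-- s1, s2 and the banked total; the base case is the tail 'total + max(s1 + rest1, s2 + rest2)'
def mps_v3AltLoop : List Int → List Int → Int → Int → Int → Int
  | a :: t1, b :: t2, s1, s2, total =>
      if a < b then mps_v3AltLoop t1 (b :: t2) (s1 + a) s2 total
      else if b < a then mps_v3AltLoop (a :: t1) t2 s1 (s2 + b) total
      else mps_v3AltLoop t1 t2 0 0 (total + max s1 s2 + a)
  | l1, l2, s1, s2, total => total + max (s1 + l1.sum) (s2 + l2.sum)
  termination_by l1 l2 _ _ _ => l1.length + l2.length

def mps_v3_alt (l1 : List Int) (l2 : List Int) : Int := mps_v3AltLoop l1 l2 0 0 0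

-- ===== PRECONDITION & SPEC =====
-- Pre_ admits pairs sharing no element (any order) and otherwise requires both lists sorted
-- ascending — the problem's natural domain: on unsorted lists with a common element A either
-- raises ValueError (list.index fails after a deletion) or returns a value depending on the
-- incidental positions of the common elements rather than a max path sum.
def Pre_mps_v3 (l1 : List Int) (l2 : List Int) : Prop :=
  (∀ x ∈ l1, x ∉ l2) ∨ (l1.Pairwise (· ≤ ·) ∧ l2.Pairwise (· ≤ ·))
instance (l1 : List Int) (l2 : List Int) : Decidable (Pre_mps_v3 l1 l2) := by unfold Pre_mps_v3; infer_instance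

def pvWitness_mps_v3 : List Int × List Int := ([1, 2, 3], [1, 3])

def Spec_mps_v3 (l1 : List Int) (l2 : List Int) (out : Int) : Prop := out = mps_v3_alt l1 l2
instance (l1 : List Int) (l2 : List Int) (out : Int) : Decidable (Spec_mps_v3 l1 l2 out) := by unfold Spec_mps_v3; infer_instance

-- ===== CLAIM (what is proved, stated in full; the proofs are below) =====
def Claim_equal_mps_v3 : Prop := ∀ (l1 : List Int) (l2 : List Int), Dom_mps_v3 l1 l2 → Pre_mps_v3 l1 l2 → Spec_mps_v3 l1 l2 (mps_v3 l1 l2)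

-- ===== LEMMAS AND PROOFS =====

lemma sorted_mem_min (l : List Int) (x : Int) (hs : l.Pairwise (· ≤ ·)) (hx : x ∈ l)
    (hmin : ∀ y ∈ l, x ≤ y) : ∃ u, l = x :: u := by
  cases l with
  | nil => simp at hx
  | cons h u =>
    have hxh : x ≤ h := hmin h (by simp)
    rcases List.mem_cons.mp hx with rfl | hxu
    · exact ⟨u, rfl⟩
    · have : h ≤ x := (List.pairwise_cons.mp hs).1 x hxu
      have hhx : h = x := le_antisymm this hxh
      exact ⟨u, by rw [hhx]⟩

lemma altLoop_no_common (l1 l2 : List Int) (s1 s2 t : Int) (h : ∀ x ∈ l1, x ∉ l2) :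
    mps_v3AltLoop l1 l2 s1 s2 t = t + max (s1 + l1.sum) (s2 + l2.sum) := by
  induction l1, l2, s1, s2, t using mps_v3AltLoop.induct with
  | case1 a t1 b t2 s1 s2 total hab ih =>
    rw [mps_v3AltLoop, if_pos hab]
    rw [ih (fun x hx => h x (List.mem_cons_of_mem a hx))]
    simp [List.sum_cons]; ring_nf
  | case2 a t1 b t2 s1 s2 total hab hba ih =>
    rw [mps_v3AltLoop, if_neg hab, if_pos hba]
    rw [ih (fun x hx hx2 => h x hx (List.mem_cons_of_mem b hx2))]
    simp [List.sum_cons]; ring_nf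
  | case3 a t1 b t2 s1 s2 total hab hba ih =>
    exact absurd (by omega : a = b) (fun hh => h a (by simp) (by simp [hh]))
  | case4 l1 l2 s1 s2 total hne =>
    rw [mps_v3AltLoop]
    exact hne

lemma altLoop_cross (p1 : List Int) : ∀ (p2 r1 r2 : List Int) (c s1 s2 t : Int),
    (∀ x ∈ p1, x < c) → (∀ x ∈ p2, x < c) → (∀ x ∈ p1, x ∉ p2) →
    mps_v3AltLoop (p1 ++ c :: r1) (p2 ++ c :: r2) s1 s2 t
      = mps_v3AltLoop r1 r2 0 0 (t + max (s1 + p1.sum) (s2 + p2.sum) + c) := by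
  induction p1 with
  | nil =>
    intro p2
    induction p2 with
    | nil =>
      intro r1 r2 c s1 s2 t h1 h2 h3
      simp only [List.nil_append]
      rw [mps_v3AltLoop, if_neg (lt_irrefl c), if_neg (lt_irrefl c)]
      simp
    | cons b q2 ih2 =>
      intro r1 r2 c s1 s2 t h1 h2 h3
      have hbc : b < c := h2 b (by simp)
      simp only [List.nil_append, List.cons_append]
      rw [mps_v3AltLoop, if_neg (by omega), if_pos hbc]
      have := ih2 r1 r2 c s1 (s2 + b) t h1 (fun x hx => h2 x (by simp [hx])) (by simp)
      simp only [List.nil_append] at this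
      rw [this]
      simp [List.sum_cons]; ring_nf
  | cons a q1 ih1 =>
    intro p2
    induction p2 with
    | nil =>
      intro r1 r2 c s1 s2 t h1 h2 h3
      have hac : a < c := h1 a (by simp)
      simp only [List.cons_append, List.nil_append]
      rw [mps_v3AltLoop, if_pos hac]
      have := ih1 [] r1 r2 c (s1 + a) s2 t (fun x hx => h1 x (by simp [hx])) h2 (by simp)
      simp only [List.nil_append] at this
      rw [this]
      simp [List.sum_cons]; ring_nf
    | cons b q2 ih2 =>
      intro r1 r2 c s1 s2 t h1 h2 h3
      have hab : a ≠ b := fun hh => h3 a (by simp) (by simp [hh])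
      simp only [List.cons_append]
      rcases lt_or_gt_of_ne hab with hlt | hgt
      · rw [mps_v3AltLoop, if_pos hlt]
        have := ih1 (b :: q2) r1 r2 c (s1 + a) s2 t (fun x hx => h1 x (by simp [hx])) h2
          (fun x hx => h3 x (by simp [hx]))
        simp only [List.cons_append] at this
        rw [this]
        simp [List.sum_cons]; ring_nf
      · rw [mps_v3AltLoop, if_neg (by omega), if_pos hgt]
        have := ih2 r1 r2 c s1 (s2 + b) t h1 (fun x hx => h2 x (by simp [hx]))
          (fun x hx hx2 => h3 x hx (by simp [hx2]))
        simp only [List.cons_append] at this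
        rw [this]
        simp [List.sum_cons]; ring_nf

lemma aLoop_shift (c d : Int) (rest l1 l2 : List Int) (t : Int) (hdc : d ≠ c)
    (h1 : c ∈ l1) (h2 : c ∈ l2) :
    mps_v3Loop (c :: rest) (d :: l1) (d :: l2) t = mps_v3Loop (c :: rest) l1 l2 (t + d) := by
  obtain ⟨k1, hk1⟩ := Option.isSome_iff_exists.mp ((PySem.List.index?_isSome_iff l1 c).mpr h1)
  obtain ⟨k2, hk2⟩ := Option.isSome_iff_exists.mp ((PySem.List.index?_isSome_iff l2 c).mpr h2)
  rw [mps_v3Loop, mps_v3Loop]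
  simp only [PySem.List.index?_cons_of_ne _ hdc, hk1, hk2, Option.map_some, Option.getD_some,
    List.take_succ_cons, List.drop_succ_cons, List.sum_cons]
  rw [max_add_add_left]
  ring_nf

lemma main_loop (n : Nat) : ∀ (l1 l2 cs : List Int) (t : Int),
    l1.length + l2.length ≤ n →
    l1.Pairwise (· ≤ ·) → l2.Pairwise (· ≤ ·) → cs.Pairwise (· < ·) →
    (∀ x ∈ cs, x ∈ l1 ∧ x ∈ l2) →
    (∀ x, x ∈ l1 → x ∈ l2 → x ∈ cs ∨ ((∃ u, l1 = x :: u) ∧ (∃ v, l2 = x :: v))) →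
    mps_v3Loop cs l1 l2 t = mps_v3AltLoop l1 l2 0 0 t := by
  induction n with
  | zero =>
    intro l1 l2 cs t hlen hs1 hs2 hcs hmem hextra
    have h1 : l1 = [] := List.eq_nil_of_length_eq_zero (by omega)
    have h2 : l2 = [] := List.eq_nil_of_length_eq_zero (by omega)
    subst h1; subst h2
    have hcsnil : cs = [] := by
      cases cs with
      | nil => rfl
      | cons c r => exact absurd (hmem c (by simp)).1 (by simp)
    subst hcsnil
    simp [mps_v3Loop, mps_v3AltLoop]
  | succ n ih =>
    intro l1 l2 cs t hlen hs1 hs2 hcs hmem hextra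
    match h1 : l1, h2 : l2 with
    | [], l2 =>
      have hcsnil : cs = [] := by
        cases cs with
        | nil => rfl
        | cons c r => exact absurd (hmem c (by simp)).1 (by simp)
      subst hcsnil
      simp [mps_v3Loop, mps_v3AltLoop]
    | a :: t1, [] =>
      have hcsnil : cs = [] := by
        cases cs with
        | nil => rfl
        | cons c r => exact absurd (hmem c (by simp)).2 (by simp)
      subst hcsnil
      simp [mps_v3Loop, mps_v3AltLoop]
    | a :: t1, b :: t2 =>
      have hst1 : t1.Pairwise (· ≤ ·) := (List.pairwise_cons.mp hs1).2
      have hst2 : t2.Pairwise (· ≤ ·) := (List.pairwise_cons.mp hs2).2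
      have ha1 : ∀ y ∈ t1, a ≤ y := (List.pairwise_cons.mp hs1).1
      have hb2 : ∀ y ∈ t2, b ≤ y := (List.pairwise_cons.mp hs2).1
      by_cases hab : a = b
      · subst hab
        -- equal heads: B matches
        have hB : mps_v3AltLoop (a :: t1) (a :: t2) 0 0 t = mps_v3AltLoop t1 t2 0 0 (t + a) := by
          rw [mps_v3AltLoop, if_neg (lt_irrefl a), if_neg (lt_irrefl a)]
          norm_num
        -- heads-of-tails helper: if a is still in both tails the tails start with a
        have hheads : ∀ x, x ∈ t1 → x ∈ t2 → x = a →
            ((∃ u, t1 = x :: u) ∧ (∃ v, t2 = x :: v)) := by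
          rintro x hx1 hx2 rfl
          exact ⟨sorted_mem_min t1 x hst1 hx1 ha1, sorted_mem_min t2 x hst2 hx2 hb2⟩
        by_cases hacs : a ∈ cs
        · -- a is the next common value: both step
          obtain ⟨c, rest, rfl⟩ : ∃ c rest, cs = c :: rest := by
            cases cs with
            | nil => simp at hacs
            | cons c r => exact ⟨c, r, rfl⟩
          have hca : c = a := by
            have hcin : c ∈ a :: t1 := (hmem c (by simp)).1
            have hac2 : a ≤ c := by
              rcases List.mem_cons.mp hcin with rfl | h
              · rfl
              · exact ha1 c h
            rcases List.mem_cons.mp hacs with rfl | h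
            · rfl
            · exact absurd ((List.pairwise_cons.mp hcs).1 a h) (by omega)
          subst hca
          rw [hB, mps_v3Loop]
          simp only [PySem.List.index?_cons_self, Option.getD_some, List.take_succ_cons,
            List.take_zero, List.drop_succ_cons, List.drop_zero, List.sum_cons, List.sum_nil]
          have hstep : t + max (c + 0) (c + 0) = t + c := by omega
          rw [hstep]
          apply ih t1 t2 rest (t + c) (by simp at hlen ⊢; omega) hst1 hst2
            ((List.pairwise_cons.mp hcs).2)
          · intro x hx
            have hxgt : c < x := (List.pairwise_cons.mp hcs).1 x hx
            obtain ⟨hxl1, hxl2⟩ := hmem x (by simp [hx])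
            constructor
            · rcases List.mem_cons.mp hxl1 with rfl | h
              · omega
              · exact h
            · rcases List.mem_cons.mp hxl2 with rfl | h
              · omega
              · exact h
          · intro x hx1 hx2
            rcases hextra x (by simp [hx1]) (by simp [hx2]) with hin | ⟨⟨u, hu⟩, ⟨v, hv⟩⟩
            · rcases List.mem_cons.mp hin with rfl | h
              · exact Or.inr (hheads x hx1 hx2 rfl)
              · exact Or.inl h
            · have hh : c = x := by injection hu
              exact Or.inr (hheads x hx1 hx2 hh.symm)
        · -- equal heads not in cs: absorbed on both sides
          cases cs with
          | nil =>
            have hA : mps_v3Loop [] (a :: t1) (a :: t2) t = mps_v3Loop [] t1 t2 (t + a) := by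
              rw [mps_v3Loop, mps_v3Loop]
              simp only [List.sum_cons]
              rw [max_add_add_left]
              ring_nf
            rw [hB, hA]
            apply ih t1 t2 [] (t + a) (by simp at hlen ⊢; omega) hst1 hst2 (by simp)
            · simp
            · intro x hx1 hx2
              rcases hextra x (by simp [hx1]) (by simp [hx2]) with hin | ⟨⟨u, hu⟩, ⟨v, hv⟩⟩
              · simp at hin
              · have hh : a = x := by injection hu
                exact Or.inr (hheads x hx1 hx2 hh.symm)
          | cons c rest =>
            have hac : a ≠ c := fun hh => hacs (by simp [hh])
            have hct1 : c ∈ t1 := by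
              rcases List.mem_cons.mp (hmem c (by simp)).1 with rfl | h
              · exact absurd rfl hac.symm
              · exact h
            have hct2 : c ∈ t2 := by
              rcases List.mem_cons.mp (hmem c (by simp)).2 with rfl | h
              · exact absurd rfl hac.symm
              · exact h
            rw [aLoop_shift c a rest t1 t2 t hac hct1 hct2, hB]
            apply ih t1 t2 (c :: rest) (t + a) (by simp at hlen ⊢; omega) hst1 hst2 hcs
            · intro x hx
              obtain ⟨hxl1, hxl2⟩ := hmem x hx
              have hxa : x ≠ a := fun hh => hacs (hh ▸ hx)
              exact ⟨(List.mem_cons.mp hxl1).resolve_left hxa,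
                     (List.mem_cons.mp hxl2).resolve_left hxa⟩
            · intro x hx1 hx2
              rcases hextra x (by simp [hx1]) (by simp [hx2]) with hin | ⟨⟨u, hu⟩, ⟨v, hv⟩⟩
              · exact Or.inl hin
              · have hh : a = x := by injection hu
                exact Or.inr (hheads x hx1 hx2 hh.symm)
      · -- unequal heads
        cases cs with
        | nil =>
          have hnc : ∀ x ∈ a :: t1, x ∉ b :: t2 := by
            intro x hx1 hx2
            rcases hextra x hx1 hx2 with hin | ⟨⟨u, hu⟩, ⟨v, hv⟩⟩
            · simp at hin
            · have hxa : a = x := by injection hu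
              have hxb : b = x := by injection hv
              exact hab (hxa.trans hxb.symm)
          rw [altLoop_no_common _ _ _ _ _ hnc, mps_v3Loop]
          norm_num
        | cons c rest =>
          -- decompose both lists at the first occurrence of c
          obtain ⟨k1, hk1⟩ := Option.isSome_iff_exists.mp
            ((PySem.List.index?_isSome_iff (a :: t1) c).mpr (hmem c (by simp)).1)
          obtain ⟨p1, r1, hdec1, hlen1, hnp1⟩ := (PySem.List.index?_eq_some_iff _ c k1).mp hk1
          obtain ⟨k2, hk2⟩ := Option.isSome_iff_exists.mp
            ((PySem.List.index?_isSome_iff (b :: t2) c).mpr (hmem c (by simp)).2)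
          obtain ⟨p2, r2, hdec2, hlen2, hnp2⟩ := (PySem.List.index?_eq_some_iff _ c k2).mp hk2
          have hsort1 : (p1 ++ c :: r1).Pairwise (· ≤ ·) := hdec1 ▸ hs1
          have hsort2 : (p2 ++ c :: r2).Pairwise (· ≤ ·) := hdec2 ▸ hs2
          have hp1c : ∀ x ∈ p1, x < c := by
            intro x hx
            have hle : x ≤ c := (List.pairwise_append.mp hsort1).2.2 x hx c (by simp)
            have hne : x ≠ c := fun hh => hnp1 (hh ▸ hx)
            omega
          have hp2c : ∀ x ∈ p2, x < c := by
            intro x hx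
            have hle : x ≤ c := (List.pairwise_append.mp hsort2).2.2 x hx c (by simp)
            have hne : x ≠ c := fun hh => hnp2 (hh ▸ hx)
            omega
          have hr1ge : ∀ x ∈ r1, c ≤ x :=
            (List.pairwise_cons.mp (List.pairwise_append.mp hsort1).2.1).1
          have hr2ge : ∀ x ∈ r2, c ≤ x :=
            (List.pairwise_cons.mp (List.pairwise_append.mp hsort2).2.1).1
          have hsr1 : r1.Pairwise (· ≤ ·) :=
            (List.pairwise_cons.mp (List.pairwise_append.mp hsort1).2.1).2
          have hsr2 : r2.Pairwise (· ≤ ·) :=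
            (List.pairwise_cons.mp (List.pairwise_append.mp hsort2).2.1).2
          have hcrest : ∀ x ∈ rest, c < x := (List.pairwise_cons.mp hcs).1
          have hdisj : ∀ x ∈ p1, x ∉ p2 := by
            intro x hx1 hx2
            have hxc : x < c := hp1c x hx1
            have hxl1 : x ∈ a :: t1 := by rw [hdec1]; exact List.mem_append_left _ hx1
            have hxl2 : x ∈ b :: t2 := by rw [hdec2]; exact List.mem_append_left _ hx2
            rcases hextra x hxl1 hxl2 with hin | ⟨⟨u, hu⟩, ⟨v, hv⟩⟩
            · rcases List.mem_cons.mp hin with rfl | h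
              · omega
              · exact absurd (hcrest x h) (by omega)
            · have hxa : a = x := by injection hu
              have hxb : b = x := by injection hv
              exact hab (hxa.trans hxb.symm)
          rw [hdec1, hdec2]
          rw [altLoop_cross p1 p2 r1 r2 c 0 0 t hp1c hp2c hdisj]
          have hidx1 : PySem.List.index? (p1 ++ c :: r1) c = some p1.length :=
            (PySem.List.index?_eq_some_iff _ c p1.length).mpr ⟨p1, r1, rfl, rfl, hnp1⟩
          have hidx2 : PySem.List.index? (p2 ++ c :: r2) c = some p2.length :=
            (PySem.List.index?_eq_some_iff _ c p2.length).mpr ⟨p2, r2, rfl, rfl, hnp2⟩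
          rw [mps_v3Loop]
          simp only [hidx1, hidx2, Option.getD_some, List.take_length_add_append,
            List.drop_length_add_append, List.take_succ_cons, List.take_zero,
            List.drop_succ_cons, List.drop_zero, List.sum_append, List.sum_cons, List.sum_nil]
          have hacc : t + max (p1.sum + (c + 0)) (p2.sum + (c + 0))
              = t + max (0 + p1.sum) (0 + p2.sum) + c := by
            have h1 : p1.sum + (c + 0) = p1.sum + c := by ring
            have h2 : p2.sum + (c + 0) = p2.sum + c := by ring
            rw [h1, h2, max_add_add_right]
            ring_nf
          rw [hacc]
          have hlen' : r1.length + r2.length ≤ n := by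
            have e1 := congrArg List.length hdec1
            have e2 := congrArg List.length hdec2
            simp [List.length_append] at e1 e2 hlen
            omega
          apply ih r1 r2 rest _ hlen' hsr1 hsr2 ((List.pairwise_cons.mp hcs).2)
          · intro x hx
            have hxc : c < x := hcrest x hx
            obtain ⟨hxl1, hxl2⟩ := hmem x (by simp [hx])
            rw [hdec1] at hxl1
            rw [hdec2] at hxl2
            constructor
            · rcases List.mem_append.mp hxl1 with h | h
              · exact absurd (hp1c x h) (by omega)
              · rcases List.mem_cons.mp h with rfl | h'
                · omega
                · exact h'
            · rcases List.mem_append.mp hxl2 with h | h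
              · exact absurd (hp2c x h) (by omega)
              · rcases List.mem_cons.mp h with rfl | h'
                · omega
                · exact h'
          · intro x hx1 hx2
            have hxl1 : x ∈ a :: t1 := by
              rw [hdec1]; exact List.mem_append_right _ (List.mem_cons_of_mem _ hx1)
            have hxl2 : x ∈ b :: t2 := by
              rw [hdec2]; exact List.mem_append_right _ (List.mem_cons_of_mem _ hx2)
            rcases hextra x hxl1 hxl2 with hin | ⟨⟨u, hu⟩, ⟨v, hv⟩⟩
            · rcases List.mem_cons.mp hin with rfl | h
              · exact Or.inr ⟨sorted_mem_min r1 x hsr1 hx1 hr1ge,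
                  sorted_mem_min r2 x hsr2 hx2 hr2ge⟩
              · exact Or.inl h
            · have hxa : a = x := by injection hu
              have hxb : b = x := by injection hv
              exact absurd (hxa.trans hxb.symm) hab

-- ===== VERDICT (by name: the statement is the Claim_ definition above) =====
theorem mps_v3_spec : Claim_equal_mps_v3 := by
  intro l1 l2 _ hpre
  show mps_v3 l1 l2 = mps_v3_alt l1 l2
  have hCmem : ∀ x, x ∈ PySem.List.sorted
      (PySem.Set.ofList (PySem.Set.inter (PySem.Set.ofList l1) l2)) (fun x => x) false
      ↔ x ∈ l1 ∧ x ∈ l2 := by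
    intro x
    rw [PySem.List.mem_sorted, PySem.Set.mem_ofList, PySem.Set.mem_inter,
      PySem.Set.mem_ofList]
  by_cases hc : PySem.List.sorted
      (PySem.Set.ofList (PySem.Set.inter (PySem.Set.ofList l1) l2)) (fun x => x) false = []
  · have hnc : ∀ x ∈ l1, x ∉ l2 := by
      intro x hx1 hx2
      have := (hCmem x).mpr ⟨hx1, hx2⟩
      rw [hc] at this
      simp at this
    rw [mps_v3, mps_v3_alt]
    simp only [hc, List.length_nil]
    rw [if_pos (by omega), altLoop_no_common l1 l2 0 0 0 hnc]
    simp
  · obtain ⟨c0, cr, hcr⟩ : ∃ c0 cr, PySem.List.sorted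
        (PySem.Set.ofList (PySem.Set.inter (PySem.Set.ofList l1) l2)) (fun x => x) false
        = c0 :: cr := by
      cases h : PySem.List.sorted
          (PySem.Set.ofList (PySem.Set.inter (PySem.Set.ofList l1) l2)) (fun x => x) false with
      | nil => exact absurd h hc
      | cons c0 cr => exact ⟨c0, cr, rfl⟩
    obtain ⟨hc01, hc02⟩ := (hCmem c0).mp (by rw [hcr]; simp)
    have hsorted : l1.Pairwise (· ≤ ·) ∧ l2.Pairwise (· ≤ ·) := by
      rcases hpre with h | h
      · exact absurd hc02 (h c0 hc01)
      · exact h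
    rw [mps_v3, mps_v3_alt]
    simp only [hcr, List.length_cons]
    rw [if_neg (by omega), ← hcr]
    apply main_loop (l1.length + l2.length) l1 l2 _ 0 le_rfl hsorted.1 hsorted.2
      (PySem.List.sorted_ofList_pairwise_lt ..)
    · intro x hx
      exact (hCmem x).mp hx
    · intro x hx1 hx2
      exact Or.inl ((hCmem x).mpr ⟨hx1, hx2⟩)
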